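-- pv_equiv track=rewrite | github.com/RemiErr/2026-python | weeks/week-03/solutions/1111405012/QUESTION-490.py | solve
-- ===== SOURCE A (Python) =====
-- from typing import List
--
-- def solve(input_str: str) -> str:
--     """處理輸入字串並回傳輸出字串。"""
--     lines = input_str.splitlines()
--     if not lines:
--         return ""
--
--     max_len = max(len(line) for line in lines)
--     # 右邊補空白形成矩形
--     padded = [line.ljust(max_len) for line in lines]
--
--     # 由最後一行到第一行，逐欄輸出
--     out_lines: List[str] = []
--     for col in range(max_len):
--         # 取出同一欄的字元，從最後一列往上
--         chars = [padded[row][col] for row in range(len(padded) - 1, -1, -1)]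
--         # 右側多餘空白不輸出
--         out_lines.append("".join(chars).rstrip())
--
--     return "\n".join(out_lines) + "\n"
-- ===== SOURCE B (Python) =====
-- def solve(input_str: str) -> str:
--     """處理輸入字串並回傳輸出字串。"""
--     lines = input_str.splitlines()
--     if not lines:
--         return ""
--
--     # One pass over the lines: each column string is built by prepending the
--     # current char (so it ends up bottom-to-top), and stays empty until its
--     # first non-whitespace char, which makes A's rstrip unnecessary.
--     cols = []
--     for line in lines:
--         cols += [''] * (len(line) - len(cols))
--         for i in range(len(cols)):
--             ch = line[i] if i < len(line) else ' '
--             if cols[i] or not ch.isspace():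
--                 cols[i] = ch + cols[i]
--
--     return '\n'.join(cols) + '\n'
-- ===== Notes on version B (the rewrite author's own statement) =====
-- stated objective: faster
-- what changed: B builds the rotated columns in a single pass over the lines, prepending each char to its column string (bottom-to-top order falls out) and keeping a column empty until its first non-whitespace char, so A's max/padding pass, nested column-extraction loop and rstrip all disappear.
import Mathlib
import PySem

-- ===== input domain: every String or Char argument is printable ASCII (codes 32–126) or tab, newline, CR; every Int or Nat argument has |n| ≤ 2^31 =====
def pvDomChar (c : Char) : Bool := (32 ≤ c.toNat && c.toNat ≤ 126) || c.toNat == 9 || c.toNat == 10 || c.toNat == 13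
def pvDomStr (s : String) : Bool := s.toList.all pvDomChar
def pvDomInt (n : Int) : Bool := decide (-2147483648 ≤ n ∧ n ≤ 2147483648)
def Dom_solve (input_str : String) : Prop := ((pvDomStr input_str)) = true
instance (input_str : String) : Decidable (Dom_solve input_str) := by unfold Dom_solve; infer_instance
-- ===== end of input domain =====

-- B rotates the block in ONE pass over the lines, prepending each char to its column
-- (bottom-first order falls out) and skipping leading whitespace per column, so the
-- explicit padding, the nested column-extraction pass and the rstrip disappear.

-- ===== PORT A =====
def solve (input_str : String) : String :=
  let lines := (PySem.Str.splitlines input_str).map String.toList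
  if lines = [] then "" else
  -- max(len(line) for line in lines); lines ≠ [] here so max? is some (getD never fires)
  let maxLen : Nat := (PySem.List.max? (lines.map List.length) id).getD 0
  -- line.ljust(max_len): exact, since every length ≤ maxLen
  let padded := lines.map (fun l => l ++ List.replicate (maxLen - l.length) ' ')
  let outLines := (PySem.List.pyRange 0 (maxLen : Int) 1).map (fun col =>
    let chars := (PySem.List.pyRange ((padded.length : Int) - 1) (-1) (-1)).map
      (fun row => PySem.List.pyGetD (PySem.List.pyGetD padded row []) col ' ')
    PySem.Chars.rstrip chars)
  String.ofList (PySem.Chars.join ['\n'] outLines ++ ['\n'])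

-- ===== PORT B =====
-- body of B's outer loop: grow `cols`, then update every slot (index loop as zipIdx map)
def solveAltStep (cols : List (List Char)) (line : List Char) : List (List Char) :=
  let cols := cols ++ List.replicate (line.length - cols.length) []
  cols.zipIdx.map (fun p =>
    let ch := if p.2 < line.length then line.getD p.2 ' ' else ' '
    if p.1 ≠ [] ∨ PySem.Chars.isspace ch = false then ch :: p.1 else p.1)

def solve_alt (input_str : String) : String :=
  let lines := (PySem.Str.splitlines input_str).map String.toList
  if lines = [] then "" else
  let cols := lines.foldl solveAltStep []
  String.ofList (PySem.Chars.join ['\n'] cols ++ ['\n'])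

-- ===== PRECONDITION & SPEC =====
def Spec_solve (input_str : String) (out : String) : Prop := out = solve_alt input_str
instance (input_str : String) (out : String) : Decidable (Spec_solve input_str out) := by unfold Spec_solve; infer_instance

-- ===== CLAIM (what is proved, stated in full; the proofs are below) =====
def Claim_equal_solve : Prop := ∀ (input_str : String), Dom_solve input_str → Spec_solve input_str (solve input_str)

-- ===== LEMMAS AND PROOFS =====

-- the rectangle width: max line length seen so far (B's running `len(cols)`)
def pvWidth (lines : List (List Char)) : Nat := lines.foldl (fun a l => max a l.length) 0

-- the column at c, top to bottom, with implicit space padding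
def pvColTB (lines : List (List Char)) (c : Nat) : List Char := lines.map (fun l => l.getD c ' ')

-- the finished column string: drop the leading (= top) whitespace, read bottom-to-top
def pvColB (lines : List (List Char)) (c : Nat) : List Char :=
  ((pvColTB lines c).dropWhile PySem.Chars.isspace).reverse

theorem pvWidth_append (pre : List (List Char)) (l : List Char) :
    pvWidth (pre ++ [l]) = max (pvWidth pre) l.length := by
  simp [pvWidth, List.foldl_append]

theorem le_pvWidth {lines : List (List Char)} {l : List Char} (h : l ∈ lines) :
    l.length ≤ pvWidth lines := by
  induction lines using List.reverseRecOn with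
  | nil => simp at h
  | append_singleton pre x ih =>
    rw [pvWidth_append]
    rcases List.mem_append.1 h with h' | h'
    · exact le_max_of_le_left (ih h')
    · simp at h'; subst h'; exact le_max_right _ _

theorem pvWidth_le {lines : List (List Char)} {m : Nat}
    (h : ∀ l ∈ lines, l.length ≤ m) : pvWidth lines ≤ m := by
  induction lines using List.reverseRecOn with
  | nil => simp [pvWidth]
  | append_singleton pre x ih =>
    rw [pvWidth_append]
    exact max_le (ih fun l hl => h l (List.mem_append_left _ hl))
      (h x (by simp))

theorem pvColB_ge_width {lines : List (List Char)} {c : Nat}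
    (h : pvWidth lines ≤ c) : pvColB lines c = [] := by
  have : pvColTB lines c = List.replicate lines.length ' ' := by
    unfold pvColTB
    rw [List.eq_replicate_iff]
    refine ⟨by simp, ?_⟩
    intro ch hch
    rcases List.mem_map.1 hch with ⟨l, hl, rfl⟩
    have : l.length ≤ c := le_trans (le_pvWidth hl) h
    exact List.getD_eq_default _ _ this
  unfold pvColB
  rw [this]
  have : ∀ n, List.dropWhile PySem.Chars.isspace (List.replicate n ' ') = ([] : List Char) := by
    intro n; induction n with
    | zero => simp
    | succ k ih => simp [List.replicate_succ, PySem.Chars.isspace, ih]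
  simp [this]

-- one bottom-row step on one column: prepend unless still all-whitespace
theorem pvColB_step (tb : List Char) (ch : Char) :
    (if (List.dropWhile PySem.Chars.isspace tb).reverse ≠ [] ∨ PySem.Chars.isspace ch = false
     then ch :: (List.dropWhile PySem.Chars.isspace tb).reverse
     else (List.dropWhile PySem.Chars.isspace tb).reverse)
    = (List.dropWhile PySem.Chars.isspace (tb ++ [ch])).reverse := by
  rw [List.dropWhile_append]
  by_cases hd : List.dropWhile PySem.Chars.isspace tb = []
  · simp only [hd, List.isEmpty_nil, if_true]
    by_cases hs : PySem.Chars.isspace ch = false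
    · simp [hs]
    · simp only [Bool.not_eq_false] at hs
      simp [hs]
  · have : (List.dropWhile PySem.Chars.isspace tb).isEmpty = false := by
      simpa [List.isEmpty_iff] using hd
    simp [this, hd]

theorem pvColB_append (lines : List (List Char)) (l : List Char) (c : Nat) :
    pvColB (lines ++ [l]) c =
    (if pvColB lines c ≠ [] ∨ PySem.Chars.isspace (l.getD c ' ') = false
     then l.getD c ' ' :: pvColB lines c else pvColB lines c) := by
  unfold pvColB pvColTB
  rw [List.map_append, List.map_singleton, ← pvColB_step]

-- B's loop invariant: after the processed rows, cols is exactly the finished columns so far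
theorem solveAltStep_inv (pre : List (List Char)) (l : List Char) :
    solveAltStep ((List.range (pvWidth pre)).map (pvColB pre)) l =
    (List.range (pvWidth (pre ++ [l]))).map (pvColB (pre ++ [l])) := by
  unfold solveAltStep
  apply List.ext_getElem
  · simp [pvWidth_append]; omega
  · intro i h1 h2
    simp only [List.getElem_map, List.getElem_zipIdx, List.getElem_range, List.length_map,
      List.length_zipIdx, List.length_append, List.length_replicate, List.length_range,
      Nat.zero_add] at h1 h2 ⊢
    have hi : i < max (pvWidth pre) l.length := by
      simpa [pvWidth_append] using h2
    -- the grown accumulator at i is pvColB pre i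
    have hb : i < ((List.range (pvWidth pre)).map (pvColB pre) ++
        List.replicate (l.length - pvWidth pre) ([] : List Char)).length := by
      simp only [List.length_append, List.length_map, List.length_range,
        List.length_replicate]
      omega
    have hacc : ((List.range (pvWidth pre)).map (pvColB pre) ++
        List.replicate (l.length - pvWidth pre) ([] : List Char))[i]'hb = pvColB pre i := by
      by_cases hlt : i < pvWidth pre
      · rw [List.getElem_append_left (by simpa using hlt)]
        simp
      · rw [List.getElem_append_right (by simpa using hlt)]
        simp only [List.getElem_replicate]
        exact (pvColB_ge_width (by omega)).symm
    rw [hacc]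
    have hch : (if i < l.length then l.getD i ' ' else ' ') = l.getD i ' ' := by
      by_cases h : i < l.length
      · simp [h]
      · simp [h, List.getD_eq_default l ' ' (le_of_not_gt h)]
    rw [hch, pvColB_append pre l i]

theorem solveAlt_fold (lines pre : List (List Char)) :
    lines.foldl solveAltStep ((List.range (pvWidth pre)).map (pvColB pre)) =
    (List.range (pvWidth (pre ++ lines))).map (pvColB (pre ++ lines)) := by
  induction lines generalizing pre with
  | nil => simp
  | cons l rest ih =>
    rw [List.foldl_cons, solveAltStep_inv pre l, ih (pre ++ [l])]
    simp

-- A's maxLen is pvWidth (for nonempty lines)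
theorem maxLen_eq_width (lines : List (List Char)) (h : lines ≠ []) :
    (PySem.List.max? (lines.map List.length) id).getD 0 = pvWidth lines := by
  obtain ⟨m, hm⟩ : ∃ m, PySem.List.max? (lines.map List.length) id = some m := by
    rcases Option.eq_none_or_eq_some (PySem.List.max? (lines.map List.length) id) with h' | h'
    · rw [PySem.List.max?_eq_none_iff] at h'
      simp [List.map_eq_nil_iff] at h'
      exact absurd h' h
    · exact h'
  rw [hm, Option.getD_some]
  have hmem := PySem.List.max?_mem hm
  have hmax := PySem.List.max?_isMax hm
  apply le_antisymm
  · rcases List.mem_map.1 hmem with ⟨l, hl, rfl⟩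
    exact le_pvWidth hl
  · exact pvWidth_le fun l hl => hmax _ (List.mem_map_of_mem hl)

-- padding on the right never changes a getD-with-space lookup
theorem getD_pad (l : List Char) (w c : Nat) :
    (l ++ List.replicate w ' ').getD c ' ' = l.getD c ' ' := by
  by_cases h : c < l.length
  · rw [List.getD_eq_getElem?_getD, List.getElem?_append_left h,
      List.getD_eq_getElem?_getD]
  · rw [List.getD_eq_getElem?_getD, List.getElem?_append_right (le_of_not_gt h),
      List.getD_eq_default _ _ (le_of_not_gt h), List.getElem?_replicate]
    split <;> simp

-- A's column extraction at col c is pvColB lines c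
theorem solveA_col (lines padded : List (List Char)) (c : Nat)
    (hp : padded = lines.map (fun l => l ++ List.replicate (pvWidth lines - l.length) ' ')) :
    PySem.Chars.rstrip
      ((PySem.List.pyRange ((padded.length : Int) - 1) (-1) (-1)).map
        (fun row => PySem.List.pyGetD (PySem.List.pyGetD padded row []) (c : Int) ' '))
    = pvColB lines c := by
  have hn : padded.length = lines.length := by simp [hp]
  have hrev : (PySem.List.pyRange ((padded.length : Int) - 1) (-1) (-1)).map
        (fun row => PySem.List.pyGetD (PySem.List.pyGetD padded row []) (c : Int) ' ')
      = (pvColTB lines c).reverse := by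
    rw [PySem.List.pyRange_neg_one, List.map_map]
    apply List.ext_getElem
    · simp only [List.length_map, List.length_range, List.length_reverse, pvColTB, hn]
      omega
    · intro i h1 h2
      simp only [List.length_map, List.length_range] at h1
      have hi : i < lines.length := by
        simp [pvColTB] at h2; omega
      simp only [List.getElem_map, List.getElem_range, Function.comp_apply]
      rw [List.getElem_reverse]
      have hrow : ((padded.length : Int) - 1 - (i : Int)) = ((lines.length - 1 - i : Nat) : Int) := by
        rw [hn]; omega
      rw [hrow, PySem.List.pyGetD_natCast, PySem.List.pyGetD_natCast]
      have hlt : lines.length - 1 - i < lines.length := by omega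
      rw [List.getD_eq_getElem padded ([] : List Char)
        (show lines.length - 1 - i < padded.length by rw [hn]; exact hlt)]
      simp only [pvColTB, List.length_map]
      rw [List.getElem_map]
      have : padded[lines.length - 1 - i]'(by rw [hn]; exact hlt)
          = lines[lines.length - 1 - i]'hlt ++
            List.replicate (pvWidth lines - (lines[lines.length - 1 - i]'hlt).length) ' ' := by
        simp only [hp]; rw [List.getElem_map]
      rw [this, getD_pad]
  rw [hrev]
  simp [PySem.Chars.rstrip, pvColB]
-- ===== VERDICT (by name: the statement is the Claim_ definition above) =====
theorem solve_spec : Claim_equal_solve := by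
  intro s _
  unfold Spec_solve solve solve_alt
  by_cases h : (PySem.Str.splitlines s).map String.toList = []
  · simp only [h, if_true]
  · simp only [if_neg h]
    refine congrArg String.ofList (congrArg (fun x => PySem.Chars.join ['\n'] x ++ ['\n']) ?_)
    rw [maxLen_eq_width _ h]
    have hB : ((PySem.Str.splitlines s).map String.toList).foldl solveAltStep [] =
        (List.range (pvWidth ((PySem.Str.splitlines s).map String.toList))).map
          (pvColB ((PySem.Str.splitlines s).map String.toList)) := by
      have := solveAlt_fold ((PySem.Str.splitlines s).map String.toList) []
      simpa [pvWidth] using this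
    rw [hB, PySem.List.pyRange_one, List.map_map]
    simp only [sub_zero, Int.toNat_natCast]
    apply List.map_congr_left
    intro k hk
    simp only [zero_add]
    exact solveA_col _ _ k rfl
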